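-- pv_equiv track=rewrite | github.com/ArslanYousaf12/python-coffee-machine | main.py | is_resource_sufficient
-- ===== SOURCE A (Python) =====
-- resources = {
--     "water": 300,
--     "milk": 200,
--     "coffee": 100,
-- }
--
-- def is_resource_sufficient(drink):
--     water = 0
--     milk = 0
--     coffee = 0
--     for res in resources:
--         if res == "water":
--             water = resources[res]
--         elif res == "milk":
--             milk = resources[res]
--         else:
--             coffee = resources[res]
--     if drink == "latte" and water >= 100 and milk >= 50 and coffee >= 30:
--         return True
--     elif drink == "expresso" and milk >= 10 and coffee >= 25:
--         return True
--     elif drink == "cappuccino" and water >= 200 and milk >= 100 and coffee >= 35: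
--         return True
--     else:
--         return False
-- ===== SOURCE B (Python) =====
-- resources = {
--     "water": 300,
--     "milk": 200,
--     "coffee": 100,
-- }
--
-- requirements = {
--     "latte": {"water": 100, "milk": 50, "coffee": 30},
--     "expresso": {"milk": 10, "coffee": 25},
--     "cappuccino": {"water": 200, "milk": 100, "coffee": 35},
-- }
--
-- def is_resource_sufficient(drink):
--     if drink not in requirements:
--         return False
--     return all(resources[k] >= v for k, v in requirements[drink].items())
-- ===== Notes on version B (the rewrite author's own statement) =====
-- stated objective: idiomatic
-- what changed: Replaced the if/elif cascade plus the extraction loop over the resources dict by a per-drink requirements table read directly against the global resources, returning False for unknown drinks and all(resources[k] >= v) otherwise.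
import Mathlib
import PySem

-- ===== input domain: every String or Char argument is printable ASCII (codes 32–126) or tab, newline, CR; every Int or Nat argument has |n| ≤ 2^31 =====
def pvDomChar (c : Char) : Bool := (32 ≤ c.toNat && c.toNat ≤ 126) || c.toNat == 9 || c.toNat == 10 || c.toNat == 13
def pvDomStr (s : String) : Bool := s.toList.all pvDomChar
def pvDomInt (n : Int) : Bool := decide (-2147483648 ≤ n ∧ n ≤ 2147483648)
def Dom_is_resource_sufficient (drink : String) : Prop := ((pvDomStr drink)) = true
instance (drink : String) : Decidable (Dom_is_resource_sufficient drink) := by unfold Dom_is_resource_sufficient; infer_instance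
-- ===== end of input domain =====

-- B replaces A's if/elif cascade and extraction loop by a per-drink requirements table
-- checked directly against the resources dict (idiomatic; same cost).

-- ===== PORT A =====
-- the module-level resources dict
def pvResources : PySem.Dict String Int :=
  (((PySem.Dict.empty).insert "water" 300).insert "milk" 200).insert "coffee" 100

def is_resource_sufficient (drink : String) : Bool :=
  -- water = 0; milk = 0; coffee = 0; for res in resources: …
  let st := pvResources.keys.foldl (fun (acc : Int × Int × Int) res =>
    let (water, milk, coffee) := acc
    if res == "water" then ((pvResources.get? res).getD 0, milk, coffee)
    else if res == "milk" then (water, (pvResources.get? res).getD 0, coffee)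
    else (water, milk, (pvResources.get? res).getD 0)) (0, 0, 0)
  let water := st.1
  let milk := st.2.1
  let coffee := st.2.2
  if drink == "latte" && water ≥ 100 && milk ≥ 50 && coffee ≥ 30 then true
  else if drink == "expresso" && milk ≥ 10 && coffee ≥ 25 then true
  else if drink == "cappuccino" && water ≥ 200 && milk ≥ 100 && coffee ≥ 35 then true
  else false

-- ===== PORT B =====
def pvRequirements : PySem.Dict String (PySem.Dict String Int) :=
  (((PySem.Dict.empty).insert "latte"
      ((((PySem.Dict.empty).insert "water" 100).insert "milk" 50).insert "coffee" 30)).insert "expresso"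
      (((PySem.Dict.empty).insert "milk" 10).insert "coffee" 25)).insert "cappuccino"
      ((((PySem.Dict.empty).insert "water" 200).insert "milk" 100).insert "coffee" 35)

def is_resource_sufficient_alt (drink : String) : Bool :=
  match pvRequirements.get? drink with
  | none => false
  | some req => req.items.all (fun kv => (pvResources.get? kv.1).getD 0 ≥ kv.2)

-- ===== PRECONDITION & SPEC =====
def Spec_is_resource_sufficient (drink : String) (out : Bool) : Prop := out = is_resource_sufficient_alt drink
instance (drink : String) (out : Bool) : Decidable (Spec_is_resource_sufficient drink out) := by unfold Spec_is_resource_sufficient; infer_instance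

-- ===== CLAIM (what is proved, stated in full; the proofs are below) =====
def Claim_equal_is_resource_sufficient : Prop := ∀ (drink : String), Dom_is_resource_sufficient drink → Spec_is_resource_sufficient drink (is_resource_sufficient drink)

-- ===== LEMMAS AND PROOFS =====

-- ===== VERDICT (by name: the statement is the Claim_ definition above) =====
theorem is_resource_sufficient_spec : Claim_equal_is_resource_sufficient := by
  intro drink _
  unfold Spec_is_resource_sufficient is_resource_sufficient is_resource_sufficient_alt
  by_cases h1 : drink = "latte"
  · subst h1; decide
  by_cases h2 : drink = "expresso"
  · subst h2; decide
  by_cases h3 : drink = "cappuccino"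
  · subst h3; decide
  · have e1 : ("latte" == drink) = false := by simp [Ne.symm h1]
    have e2 : ("expresso" == drink) = false := by simp [Ne.symm h2]
    have e3 : ("cappuccino" == drink) = false := by simp [Ne.symm h3]
    simp [pvRequirements, pvResources, PySem.Dict.get?, PySem.Dict.keys, PySem.Dict.insert,
      PySem.Dict.empty, List.find?, e1, e2, e3, h1, h2, h3]
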